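-- pv_equiv track=rewrite | github.com/yogeshhk/TeachingDataScience | Code/python/mc-time-rec.py | recfunc
-- ===== SOURCE A (Python) =====
-- from typing import List
--
-- def recfunc(xs: List[int]) -> List[int]:
--     if len(xs) < 2:
--         return xs
--     a = list()
--     b = list()
--     for x in range(len(xs)):
--         if x < len(xs) // 2:
--             a.insert(0, x)
--         else:
--             b.insert(0, x)
--     return recfunc(a) + recfunc(b)
-- ===== SOURCE B (Python) =====
-- def recfunc(xs):
--     out = []
--     stack = [xs]
--     while stack:
--         cur = stack.pop()
--         n = len(cur)
--         if n < 2: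
--             out += cur
--         else:
--             a = list(reversed(range(n // 2)))
--             b = list(reversed(range(n // 2, n)))
--             stack += [b, a]
--     return out
-- ===== Notes on version B (the rewrite author's own statement) =====
-- stated objective: faster
-- what changed: Replaced the two-way recursion with an explicit worklist loop: a stack of pending index segments is popped, short segments are appended to the output, long ones are split into the two reversed index-halves (built directly with range instead of repeated insert(0,...)) and pushed left-half on top, so leaves are emitted in the recursion's left-to-right order.
import Mathlib
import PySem

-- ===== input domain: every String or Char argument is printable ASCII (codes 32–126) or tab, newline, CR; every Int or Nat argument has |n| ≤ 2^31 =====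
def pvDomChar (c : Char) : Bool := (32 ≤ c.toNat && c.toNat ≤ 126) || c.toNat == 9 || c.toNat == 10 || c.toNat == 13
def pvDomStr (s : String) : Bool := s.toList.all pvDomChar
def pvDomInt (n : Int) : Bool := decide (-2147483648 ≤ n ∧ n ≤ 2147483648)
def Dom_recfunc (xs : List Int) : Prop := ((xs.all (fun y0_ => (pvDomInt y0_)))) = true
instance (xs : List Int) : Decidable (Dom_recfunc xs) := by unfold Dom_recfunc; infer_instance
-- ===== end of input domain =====

-- B replaces A's recursion by an explicit worklist (stack) that schedules the two reversed
-- index-halves and accumulates leaf results left to right; objective: alternative decomposition.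
-- (Both ports carry a fuel argument, proven sufficient, only to make the recursion structural.)

-- ===== PORT A =====

-- A's loop step: 'if x < h: a.insert(0,x) else: b.insert(0,x)'
def pvStepA (h : Int) (p : List Int × List Int) (x : Int) : List Int × List Int :=
  if x < h then (PySem.List.insert p.1 0 x, p.2) else (p.1, PySem.List.insert p.2 0 x)

-- A's recursion; fuel xs.length is enough (proved in pvRecfuncF_congr below)
def pvRecfuncF : Nat → List Int → List Int
  | 0, xs => xs
  | fuel + 1, xs =>
    if xs.length < 2 then xs
    else
      let p := (PySem.List.pyRange 0 (xs.length : Int) 1).foldl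
        (pvStepA (PySem.Int.floordiv (xs.length : Int) 2)) ([], [])
      pvRecfuncF fuel p.1 ++ pvRecfuncF fuel p.2

def recfunc (xs : List Int) : List Int := pvRecfuncF xs.length xs

-- ===== PORT B =====

-- the while loop of Source B; head of 'st' is the top of the Python stack
-- (fuel 3*len+3 bounds the number of iterations; proved sufficient in pvLoopF_eq below)
def pvLoopF : Nat → List (List Int) → List Int → List Int
  | 0, _, out => out
  | _ + 1, [], out => out
  | fuel + 1, cur :: rest, out =>
    if cur.length < 2 then pvLoopF fuel rest (out ++ cur)
    else
      let n : Int := cur.length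
      let a := (PySem.List.pyRange 0 (PySem.Int.floordiv n 2) 1).reverse
      let b := (PySem.List.pyRange (PySem.Int.floordiv n 2) n 1).reverse
      pvLoopF fuel (a :: b :: rest) out

def recfunc_alt (xs : List Int) : List Int := pvLoopF (3 * xs.length + 3) [xs] []

-- ===== PRECONDITION & SPEC =====
def Spec_recfunc (xs : List Int) (out : List Int) : Prop := out = recfunc_alt xs
instance (xs : List Int) (out : List Int) : Decidable (Spec_recfunc xs out) := by unfold Spec_recfunc; infer_instance

-- ===== CLAIM (what is proved, stated in full; the proofs are below) =====
def Claim_equal_recfunc : Prop := ∀ (xs : List Int), Dom_recfunc xs → Spec_recfunc xs (recfunc xs)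

-- ===== LEMMAS AND PROOFS =====

theorem pvFoldA_lt (h : Int) (l : List Int) (hl : ∀ x ∈ l, x < h) (a0 b0 : List Int) :
    l.foldl (pvStepA h) (a0, b0) = (l.reverse ++ a0, b0) := by
  induction l generalizing a0 with
  | nil => simp
  | cons y t ih =>
    have hy : y < h := hl y (by simp)
    simp only [List.foldl_cons, pvStepA, if_pos hy, PySem.List.insert_zero]
    rw [ih (fun x hx => hl x (by simp [hx]))]
    simp

theorem pvFoldA_ge (h : Int) (l : List Int) (hl : ∀ x ∈ l, h ≤ x) (a0 b0 : List Int) :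
    l.foldl (pvStepA h) (a0, b0) = (a0, l.reverse ++ b0) := by
  induction l generalizing b0 with
  | nil => simp
  | cons y t ih =>
    have hy : ¬ y < h := not_lt.mpr (hl y (by simp))
    simp only [List.foldl_cons, pvStepA, if_neg hy, PySem.List.insert_zero]
    rw [ih (fun x hx => hl x (by simp [hx]))]
    simp

theorem pvFoldA_split (n : Int) (hn : 0 ≤ n) :
    (PySem.List.pyRange 0 n 1).foldl (pvStepA (PySem.Int.floordiv n 2)) ([], []) =
      ((PySem.List.pyRange 0 (PySem.Int.floordiv n 2) 1).reverse,
       (PySem.List.pyRange (PySem.Int.floordiv n 2) n 1).reverse) := by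
  have hd : PySem.Int.floordiv n 2 = n / 2 := PySem.Int.floordiv_eq_ediv_of_pos (by norm_num)
  have h0 : 0 ≤ n / 2 := by omega
  have h1 : n / 2 ≤ n := by omega
  rw [hd, PySem.List.pyRange_one_append 0 (n/2) n h0 h1, List.foldl_append]
  rw [pvFoldA_lt _ _ (fun x hx => ((PySem.List.mem_pyRange_one).1 hx).2)]
  rw [pvFoldA_ge _ _ (fun x hx => ((PySem.List.mem_pyRange_one).1 hx).1)]
  simp

theorem pvRecfuncF_short (fuel : Nat) (xs : List Int) (h : xs.length < 2) :
    pvRecfuncF fuel xs = xs := by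
  cases fuel with
  | zero => rfl
  | succ f => rw [pvRecfuncF, if_pos h]

theorem pvLenA (xs : List Int) (h : ¬ xs.length < 2) :
    (((PySem.List.pyRange 0 (xs.length : Int) 1).foldl
        (pvStepA (PySem.Int.floordiv (xs.length : Int) 2)) ([], [])).1).length = xs.length / 2 ∧
    (((PySem.List.pyRange 0 (xs.length : Int) 1).foldl
        (pvStepA (PySem.Int.floordiv (xs.length : Int) 2)) ([], [])).2).length
      = xs.length - xs.length / 2 := by
  rw [pvFoldA_split _ (by positivity)]
  have hd : PySem.Int.floordiv (xs.length : Int) 2 = (xs.length : Int) / 2 :=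
    PySem.Int.floordiv_eq_ediv_of_pos (by norm_num)
  simp only [hd, List.length_reverse, PySem.List.length_pyRange_one]
  omega

-- fuel irrelevance for A's recursion: any fuel ≥ length gives the same value
theorem pvRecfuncF_congr (f1 : Nat) : ∀ (f2 : Nat) (xs : List Int), xs.length ≤ f1 →
    xs.length ≤ f2 → pvRecfuncF f1 xs = pvRecfuncF f2 xs := by
  induction f1 with
  | zero =>
    intro f2 xs h1 _
    rw [pvRecfuncF_short _ _ (by omega), pvRecfuncF_short _ _ (by omega)]
  | succ f ih =>
    intro f2 xs h1 h2
    by_cases hs : xs.length < 2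
    · rw [pvRecfuncF_short _ _ hs, pvRecfuncF_short _ _ hs]
    · obtain ⟨f2', rfl⟩ : ∃ f2', f2 = f2' + 1 := ⟨f2 - 1, by omega⟩
      rw [pvRecfuncF, pvRecfuncF, if_neg hs, if_neg hs]
      obtain ⟨l1, l2⟩ := pvLenA xs hs
      exact congrArg₂ (· ++ ·) (ih f2' _ (by omega) (by omega)) (ih f2' _ (by omega) (by omega))

theorem pvRecfunc_long (xs : List Int) (h : ¬ xs.length < 2) :
    recfunc xs =
      recfunc ((PySem.List.pyRange 0 (PySem.Int.floordiv (xs.length : Int) 2) 1).reverse) ++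
      recfunc ((PySem.List.pyRange (PySem.Int.floordiv (xs.length : Int) 2) (xs.length : Int) 1).reverse) := by
  unfold recfunc
  obtain ⟨m, hm⟩ : ∃ m, xs.length = m + 1 := ⟨xs.length - 1, by omega⟩
  obtain ⟨l1, l2⟩ := pvLenA xs h
  rw [pvFoldA_split _ (by positivity)] at l1 l2
  simp only [List.length_reverse] at l1 l2
  rw [hm, pvRecfuncF, if_neg (by omega)]
  simp only [← hm, pvFoldA_split (xs.length : Int) (by positivity)]
  exact congrArg₂ (· ++ ·)
    (pvRecfuncF_congr m
      ((PySem.List.pyRange 0 (PySem.Int.floordiv (xs.length : Int) 2) 1).reverse.length)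
      ((PySem.List.pyRange 0 (PySem.Int.floordiv (xs.length : Int) 2) 1).reverse)
      (by simp only [List.length_reverse]; omega) (le_refl _))
    (pvRecfuncF_congr m
      ((PySem.List.pyRange (PySem.Int.floordiv (xs.length : Int) 2) (xs.length : Int) 1).reverse.length)
      ((PySem.List.pyRange (PySem.Int.floordiv (xs.length : Int) 2) (xs.length : Int) 1).reverse)
      (by simp only [List.length_reverse]; omega) (le_refl _))

-- iteration budget of one worklist entry
def pvCostB (l : List Int) : Nat := if l.length < 2 then 1 else 2 * l.length - 1

-- loop invariant with sufficient fuel: the loop returns out ++ the recursive results of the stack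
theorem pvLoopF_eq (fuel : Nat) : ∀ (st : List (List Int)) (out : List Int),
    (st.map pvCostB).sum ≤ fuel → pvLoopF fuel st out = out ++ (st.map recfunc).flatten := by
  induction fuel with
  | zero =>
    intro st out hf
    cases st with
    | nil => simp [pvLoopF]
    | cons cur rest => simp [pvCostB] at hf; split at hf <;> omega
  | succ f ih =>
    intro st out hf
    cases st with
    | nil => simp [pvLoopF]
    | cons cur rest =>
      by_cases hs : cur.length < 2
      · rw [pvLoopF, if_pos hs, ih rest (out ++ cur) (by simp only [List.map_cons, List.sum_cons, pvCostB] at hf; rw [if_pos hs] at hf; omega)]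
        have : recfunc cur = cur := by unfold recfunc; exact pvRecfuncF_short _ _ hs
        simp [this]
      · rw [pvLoopF, if_neg hs]
        have hd : PySem.Int.floordiv (cur.length : Int) 2 = (cur.length : Int) / 2 :=
          PySem.Int.floordiv_eq_ediv_of_pos (by norm_num)
        have hcost : ((((PySem.List.pyRange 0 (PySem.Int.floordiv (cur.length : Int) 2) 1).reverse ::
            (PySem.List.pyRange (PySem.Int.floordiv (cur.length : Int) 2) (cur.length : Int) 1).reverse ::
            rest).map pvCostB).sum) ≤ f := by
          simp only [List.map_cons, List.sum_cons, pvCostB, List.length_reverse,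
            PySem.List.length_pyRange_one, hd] at hf ⊢
          rw [if_neg hs] at hf
          have e1 : (((cur.length : Int) / 2 - 0).toNat) = cur.length / 2 := by omega
          have e2 : (((cur.length : Int) - (cur.length : Int) / 2).toNat)
              = cur.length - cur.length / 2 := by omega
          rw [e1, e2]
          split <;> split <;> omega
        rw [ih _ out hcost]
        simp only [List.map_cons, List.flatten_cons]
        rw [pvRecfunc_long cur hs]
        simp

-- ===== VERDICT (by name: the statement is the Claim_ definition above) =====
theorem recfunc_spec : Claim_equal_recfunc := by
  intro xs _
  unfold Spec_recfunc recfunc_alt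
  rw [pvLoopF_eq _ [xs] [] (by simp [pvCostB]; split <;> omega)]
  simp
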